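-- pv_equiv track=rewrite | github.com/pypi-data/pypi-mirror-211 | packages/wipac-file-catalog-indexer/wipac_file_catalog_indexer-2.0.2-py3-none-any.whl/indexer/metadata/simulation/iceprod_tools.py | _parse_dataset_num_from_dirpath
-- ===== SOURCE A (Python) =====
-- _ICEPROD_V2_DATASET_RANGE = range(20000, 30000)
--
-- _ICEPROD_V1_DATASET_RANGE = range(0, 20000)
--
-- class DatasetNotFound(Exception):
--     """Raise when an IceProd dataset cannot be found."""
--
-- def _parse_dataset_num_from_dirpath(filepath: str) -> int:
--     """Return the dataset num by parsing the directory path."""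
--     # try IP2 first: IP1 uses smaller numbers, so false-positive matches are more likely
--     for dataset_range in [_ICEPROD_V2_DATASET_RANGE, _ICEPROD_V1_DATASET_RANGE]:
--         parts = filepath.split("/")
--         for dir_ in reversed(parts[:-1]):  # ignore the filename; search right-to-left
--             try:
--                 dataset_num = int(dir_)
--                 if dataset_num in dataset_range:
--                     return dataset_num
--             except ValueError:
--                 continue
--     raise DatasetNotFound(f"Could not determine dataset number: {filepath}")
-- ===== SOURCE B (Python) =====
-- _ICEPROD_V2_DATASET_RANGE = range(20000, 30000)
--
-- _ICEPROD_V1_DATASET_RANGE = range(0, 20000)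
--
-- class DatasetNotFound(Exception):
--     """Raise when an IceProd dataset cannot be found."""
--
-- def _parse_dataset_num_from_dirpath(filepath: str) -> int:
--     """Return the dataset num by parsing the directory path (single right-to-left pass)."""
--     v1_candidate = None
--     for dir_ in reversed(filepath.split("/")[:-1]):  # ignore the filename
--         try:
--             n = int(dir_)
--         except ValueError:
--             continue
--         if n in _ICEPROD_V2_DATASET_RANGE:
--             return n  # IP2 wins on sight
--         if v1_candidate is None and n in _ICEPROD_V1_DATASET_RANGE:
--             v1_candidate = n  # remember the rightmost IP1 match
--     if v1_candidate is not None: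
--         return v1_candidate
--     raise DatasetNotFound(f"Could not determine dataset number: {filepath}")
-- ===== Notes on version B (the rewrite author's own statement) =====
-- stated objective: alternative
-- what changed: Replaces A's two full right-to-left scans (one per dataset range) with a single right-to-left pass that returns a V2 match on sight and remembers the first (rightmost) V1 match as a fallback.
import Mathlib
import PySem

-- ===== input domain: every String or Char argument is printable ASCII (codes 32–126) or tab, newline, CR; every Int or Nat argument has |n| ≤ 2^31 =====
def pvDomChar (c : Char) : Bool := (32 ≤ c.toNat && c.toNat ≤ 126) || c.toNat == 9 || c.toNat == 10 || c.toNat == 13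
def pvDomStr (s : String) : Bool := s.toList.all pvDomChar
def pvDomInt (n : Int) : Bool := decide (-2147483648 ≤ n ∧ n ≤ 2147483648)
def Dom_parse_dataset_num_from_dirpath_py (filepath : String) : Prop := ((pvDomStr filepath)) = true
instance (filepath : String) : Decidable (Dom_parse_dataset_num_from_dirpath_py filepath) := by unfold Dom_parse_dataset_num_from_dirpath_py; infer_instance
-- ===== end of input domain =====

-- B replaces A's two full right-to-left scans (one per range) with a single right-to-left
-- pass remembering the rightmost V1 candidate (alternative decomposition, same cost class).
-- On paths with no qualifying integer component both Pythons raise DatasetNotFound; Pre_ excludes those.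

-- ===== PORT A =====
-- inner loop of A for one range [lo, hi): first component (scanning the given list order)
-- that parses as an int inside the range; `none` = the for-loop fell through
def pvFindInRange (lo hi : Int) : List (List Char) → Option Int
  | [] => none
  | d :: rest =>
    match PySem.Int.ofChars? d with
    | some n => if lo ≤ n ∧ n < hi then some n else pvFindInRange lo hi rest
    | none => pvFindInRange lo hi rest

def parse_dataset_num_from_dirpath_py (filepath : String) : Int :=
  -- parts[:-1] = dropLast; reversed = .reverse
  let dirs := (PySem.Chars.splitOn filepath.toList ['/']).dropLast.reverse
  match pvFindInRange 20000 30000 dirs with      -- first pass: _ICEPROD_V2_DATASET_RANGE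
  | some n => n
  | none =>
    match pvFindInRange 0 20000 dirs with        -- second pass: _ICEPROD_V1_DATASET_RANGE
    | some n => n
    | none => 0                                   -- raise DatasetNotFound (excluded by Pre_)

-- ===== PORT B =====
-- single right-to-left pass: return a V2 match on sight, remember the first V1 match
def pvScanB : List (List Char) → Option Int → Option Int
  | [], v1 => v1
  | d :: rest, v1 =>
    match PySem.Int.ofChars? d with
    | none => pvScanB rest v1
    | some n =>
      if 20000 ≤ n ∧ n < 30000 then some n
      else if v1 = none ∧ 0 ≤ n ∧ n < 20000 then pvScanB rest (some n)
      else pvScanB rest v1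

def parse_dataset_num_from_dirpath_py_alt (filepath : String) : Int :=
  let dirs := (PySem.Chars.splitOn filepath.toList ['/']).dropLast.reverse
  match pvScanB dirs none with
  | some n => n
  | none => 0                                     -- raise DatasetNotFound (excluded by Pre_)

-- ===== PRECONDITION & SPEC =====
-- Pre_ excludes exactly the inputs on which A raises DatasetNotFound: no directory
-- component (all path components but the last) parses as an int in [0, 30000).
def Pre_parse_dataset_num_from_dirpath_py (filepath : String) : Prop :=
  ((PySem.Chars.splitOn filepath.toList ['/']).dropLast.any (fun s =>
    match PySem.Int.ofChars? s with
    | some n => decide (0 ≤ n ∧ n < 30000)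
    | none => false)) = true
instance (filepath : String) : Decidable (Pre_parse_dataset_num_from_dirpath_py filepath) := by
  unfold Pre_parse_dataset_num_from_dirpath_py; infer_instance

def pvWitness_parse_dataset_num_from_dirpath_py : String := "/data/sim/21234/file.i3"

def Spec_parse_dataset_num_from_dirpath_py (filepath : String) (out : Int) : Prop := out = parse_dataset_num_from_dirpath_py_alt filepath
instance (filepath : String) (out : Int) : Decidable (Spec_parse_dataset_num_from_dirpath_py filepath out) := by unfold Spec_parse_dataset_num_from_dirpath_py; infer_instance

-- ===== CLAIM (what is proved, stated in full; the proofs are below) =====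
def Claim_equal_parse_dataset_num_from_dirpath_py : Prop := ∀ (filepath : String), Dom_parse_dataset_num_from_dirpath_py filepath → Pre_parse_dataset_num_from_dirpath_py filepath → Spec_parse_dataset_num_from_dirpath_py filepath (parse_dataset_num_from_dirpath_py filepath)

-- ===== LEMMAS AND PROOFS =====

-- B's single pass equals A's two passes, for any pending V1 candidate
theorem pvScanB_eq (dirs : List (List Char)) (v1 : Option Int) :
    pvScanB dirs v1 =
      match pvFindInRange 20000 30000 dirs with
      | some n => some n
      | none =>
        match v1 with
        | some v => some v
        | none => pvFindInRange 0 20000 dirs := by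
  induction dirs generalizing v1 with
  | nil => cases v1 <;> simp [pvScanB, pvFindInRange]
  | cons d rest ih =>
    simp only [pvScanB, pvFindInRange]
    cases h : PySem.Int.ofChars? d with
    | none => exact ih v1
    | some n =>
      by_cases h2 : 20000 ≤ n ∧ n < 30000
      · simp [h2]
      · simp only [if_neg h2]
        by_cases h1 : v1 = none ∧ 0 ≤ n ∧ n < 20000
        · have hv : v1 = none := h1.1
          have hr : 0 ≤ n ∧ n < 20000 := h1.2
          rw [if_pos h1, ih (some n), hv, if_pos hr]
        · rw [if_neg h1]
          rw [ih v1]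
          cases hf : pvFindInRange 20000 30000 rest with
          | some m => rfl
          | none =>
            cases hv : v1 with
            | some v => rfl
            | none =>
              subst hv
              simp only [true_and, Decidable.not_and_iff_not_or_not] at h1
              rcases h1 with h1 | h1
              · rw [if_neg (by omega : ¬ (0 ≤ n ∧ n < 20000))]
              · rw [if_neg (by omega : ¬ (0 ≤ n ∧ n < 20000))]

-- ===== VERDICT (by name: the statement is the Claim_ definition above) =====
theorem parse_dataset_num_from_dirpath_py_spec : Claim_equal_parse_dataset_num_from_dirpath_py := by
  intro filepath _ _
  unfold Spec_parse_dataset_num_from_dirpath_py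
  unfold parse_dataset_num_from_dirpath_py parse_dataset_num_from_dirpath_py_alt
  simp only [pvScanB_eq]
  cases pvFindInRange 20000 30000 ((PySem.Chars.splitOn filepath.toList ['/']).dropLast.reverse) <;> rfl
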